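-- pv_equiv track=rewrite | github.com/prism-engines/prism | windowing/adaptive_windows.py | compute_windows_from_end
-- ===== SOURCE A (Python) =====
-- from typing import Dict, List, Optional, Any
--
-- def compute_windows_from_end(
--     entity_length: int,
--     window_size: int,
--     stride: int,
-- ) -> List[tuple]:
--     """
--     Compute window boundaries anchored from END, working backward.
--
--     This ensures we ALWAYS capture end-of-life data (RUL → 0),
--     which is the critical zone for failure prediction.
--
--     Args:
--         entity_length: Total observations for this entity
--         window_size: Size of each window
--         stride: Step between window endpoints
--
--     Returns:
--         List of (start, end) tuples in chronological order
--
--     Example: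
--         >>> compute_windows_from_end(192, 50, 16)
--         [(0, 50), (14, 64), (30, 80), ..., (142, 192)]
--         # Last window always ends at entity_length (RUL=0)
--     """
--     windows = []
--     end = entity_length
--
--     # Work backward from end (guarantees RUL=0 coverage)
--     while end - window_size >= 0:
--         start = end - window_size
--         windows.append((start, end))
--         end -= stride
--
--     # Reverse to chronological order
--     windows = list(reversed(windows))
--
--     # If first window doesn't start at 0, add a baseline window
--     # But only if gap is significant (> stride/2) to avoid redundant overlap
--     if windows and windows[0][0] > stride // 2:
--         windows.insert(0, (0, window_size))
--
--     return windows
-- ===== SOURCE B (Python) =====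
-- def compute_windows_from_end(entity_length, window_size, stride):
--     if entity_length < window_size:
--         return []
--     n = (entity_length - window_size) // stride + 1
--     windows = [
--         (entity_length - (n - 1 - i) * stride - window_size,
--          entity_length - (n - 1 - i) * stride)
--         for i in range(n)
--     ]
--     if windows and windows[0][0] > stride // 2:
--         windows.insert(0, (0, window_size))
--     return windows
-- ===== Notes on version B (the rewrite author's own statement) =====
-- stated objective: simpler
-- what changed: B computes the number of windows in closed form and builds the list forward in chronological order with a comprehension, removing A's backward while-loop and the reversed() pass.
import Mathlib
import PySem

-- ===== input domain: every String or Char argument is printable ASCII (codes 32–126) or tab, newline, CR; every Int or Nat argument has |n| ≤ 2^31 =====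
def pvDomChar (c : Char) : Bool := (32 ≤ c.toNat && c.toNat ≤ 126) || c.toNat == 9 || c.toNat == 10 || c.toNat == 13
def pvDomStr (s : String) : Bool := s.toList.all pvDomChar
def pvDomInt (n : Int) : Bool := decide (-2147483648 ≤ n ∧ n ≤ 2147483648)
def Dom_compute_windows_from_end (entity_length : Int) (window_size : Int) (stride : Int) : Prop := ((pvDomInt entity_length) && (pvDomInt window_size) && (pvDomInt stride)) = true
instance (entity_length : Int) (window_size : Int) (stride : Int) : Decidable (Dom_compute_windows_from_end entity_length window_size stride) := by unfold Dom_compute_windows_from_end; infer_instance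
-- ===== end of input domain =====

-- B replaces A's backward while-loop + reversed() with a closed-form window count and a
-- forward chronological comprehension (objective: simpler).

-- ===== PORT A =====
-- A's `while end - window_size >= 0` loop; the fuel argument only makes the recursion total
-- (under Pre_ the fuel is always sufficient, so each step is exactly one loop iteration).
def pvLoopA (ws s : Int) : Nat → Int → List (Int × Int) → List (Int × Int)
  | 0, _, acc => acc
  | f + 1, e, acc =>
      if 0 ≤ e - ws then pvLoopA ws s f (e - s) (acc ++ [(e - ws, e)]) else acc

def compute_windows_from_end (entity_length : Int) (window_size : Int) (stride : Int) : List (Int × Int) :=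
  let windows := pvLoopA window_size stride (entity_length - window_size + 1).toNat entity_length []
  let windows := windows.reverse
  match windows with
  | [] => windows
  | (st, _) :: _ =>
      if PySem.Int.floordiv stride 2 < st then (0, window_size) :: windows else windows

-- ===== PORT B =====
def compute_windows_from_end_alt (entity_length : Int) (window_size : Int) (stride : Int) : List (Int × Int) :=
  if entity_length < window_size then []
  else
    let n := PySem.Int.floordiv (entity_length - window_size) stride + 1
    let windows := (PySem.List.pyRange 0 n 1).map (fun i =>
      (entity_length - (n - 1 - i) * stride - window_size,
       entity_length - (n - 1 - i) * stride))
    match windows with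
    | [] => []
    | (st, _) :: _ =>
        if PySem.Int.floordiv stride 2 < st then (0, window_size) :: windows else windows

-- ===== PRECONDITION & SPEC =====
-- Pre_ excludes exactly the inputs where A's while-loop never terminates (Python hangs,
-- returning nothing): stride ≤ 0 while entity_length ≥ window_size.
def Pre_compute_windows_from_end (entity_length : Int) (window_size : Int) (stride : Int) : Prop :=
  0 < stride ∨ entity_length < window_size
instance (entity_length : Int) (window_size : Int) (stride : Int) : Decidable (Pre_compute_windows_from_end entity_length window_size stride) := by unfold Pre_compute_windows_from_end; infer_instance

def pvWitness_compute_windows_from_end : Int × Int × Int := (192, 50, 16)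

def Spec_compute_windows_from_end (entity_length : Int) (window_size : Int) (stride : Int) (out : List (Int × Int)) : Prop := out = compute_windows_from_end_alt entity_length window_size stride
instance (entity_length : Int) (window_size : Int) (stride : Int) (out : List (Int × Int)) : Decidable (Spec_compute_windows_from_end entity_length window_size stride out) := by unfold Spec_compute_windows_from_end; infer_instance

-- ===== CLAIM (what is proved, stated in full; the proofs are below) =====
def Claim_equal_compute_windows_from_end : Prop := ∀ (entity_length : Int) (window_size : Int) (stride : Int), Dom_compute_windows_from_end entity_length window_size stride → Pre_compute_windows_from_end entity_length window_size stride → Spec_compute_windows_from_end entity_length window_size stride (compute_windows_from_end entity_length window_size stride)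

-- ===== LEMMAS AND PROOFS =====

-- the backward window chain, in the order A appends it, written in closed form
def pvBack (ws s e : Int) : List (Int × Int) :=
  if e < ws then []
  else (List.range (PySem.Int.floordiv (e - ws) s + 1).toNat).map
        (fun k : Nat => (e - (k : Int) * s - ws, e - (k : Int) * s))

lemma pvLoopA_stop (ws s : Int) (f : Nat) (e : Int) (acc : List (Int × Int)) (h : e < ws) :
    pvLoopA ws s f e acc = acc := by
  cases f with
  | zero => rfl
  | succ f => simp only [pvLoopA]; rw [if_neg (by omega)]

lemma pvBack_step (ws s e : Int) (hs : 0 < s) (he : ws ≤ e) :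
    pvBack ws s e = (e - ws, e) :: pvBack ws s (e - s) := by
  rw [pvBack, pvBack, PySem.Int.floordiv_eq_ediv_of_pos hs, PySem.Int.floordiv_eq_ediv_of_pos hs,
      if_neg (by omega)]
  by_cases h2 : e - s < ws
  · have hq : (e - ws) / s = 0 := Int.ediv_eq_zero_of_lt (by omega) (by omega)
    rw [if_pos h2, hq]
    simp
  · have hq : (e - ws) / s = (e - s - ws) / s + 1 := by
      have h1 := Int.add_mul_ediv_right (e - s - ws) 1 (show s ≠ 0 by omega)
      rw [one_mul] at h1
      rw [show e - ws = e - s - ws + s by ring, h1]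
    have hq' : 0 ≤ (e - s - ws) / s := Int.ediv_nonneg (by omega) (by omega)
    rw [if_neg h2, hq]
    rw [show ((e - s - ws) / s + 1 + 1).toNat = ((e - s - ws) / s + 1).toNat + 1 by omega]
    rw [List.range_succ_eq_map, List.map_cons, List.map_map]
    congr 1
    · simp only [Prod.mk.injEq]
      push_cast
      constructor <;> ring
    · apply List.map_congr_left
      intro k _
      simp only [Function.comp, Prod.mk.injEq]
      push_cast
      constructor <;> ring

lemma pvLoopA_eq (ws s : Int) (hs : 0 < s) :
    ∀ (f : Nat) (e : Int) (acc : List (Int × Int)), e - ws < (f : Int) →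
      pvLoopA ws s f e acc = acc ++ pvBack ws s e := by
  intro f
  induction f with
  | zero =>
    intro e acc h
    push_cast at h
    rw [pvBack, if_pos (by omega)]
    simp [pvLoopA]
  | succ f ih =>
    intro e acc h
    simp only [pvLoopA]
    by_cases hcase : 0 ≤ e - ws
    · rw [if_pos hcase, ih (e - s) _ (by push_cast at h ⊢; omega)]
      rw [pvBack_step ws s e hs (by omega)]
      simp
    · rw [if_neg hcase, pvBack, if_pos (by omega)]
      simp

lemma pvAlt_list (el ws s : Int) (hs : 0 < s) (h : ¬ el < ws) :
    (PySem.List.pyRange 0 (PySem.Int.floordiv (el - ws) s + 1) 1).map (fun i =>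
      (el - (PySem.Int.floordiv (el - ws) s + 1 - 1 - i) * s - ws,
       el - (PySem.Int.floordiv (el - ws) s + 1 - 1 - i) * s))
    = (pvBack ws s el).reverse := by
  have hq : 0 ≤ PySem.Int.floordiv (el - ws) s := by
    rw [PySem.Int.floordiv_eq_ediv_of_pos hs]
    exact Int.ediv_nonneg (by omega) (by omega)
  rw [pvBack, if_neg h]
  rw [show PySem.List.pyRange 0 (PySem.Int.floordiv (el - ws) s + 1) 1
        = (PySem.List.pyRange (PySem.Int.floordiv (el - ws) s + 1 - 1) (-1) (-1)).reverse by
      rw [PySem.List.pyRange_neg_one_eq_reverse]; norm_num]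
  rw [PySem.List.pyRange_neg_one, List.map_reverse, List.map_map]
  congr 1
  rw [show (PySem.Int.floordiv (el - ws) s + 1 - 1 - -1).toNat
        = (PySem.Int.floordiv (el - ws) s + 1).toNat by omega]
  apply List.map_congr_left
  intro k _
  simp only [Function.comp, Prod.mk.injEq]
  constructor <;> ring

-- ===== VERDICT (by name: the statement is the Claim_ definition above) =====
theorem compute_windows_from_end_spec : Claim_equal_compute_windows_from_end := by
  intro el ws s hdom hpre
  unfold Spec_compute_windows_from_end compute_windows_from_end compute_windows_from_end_alt
  dsimp only
  by_cases hlt : el < ws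
  · rw [if_pos hlt, pvLoopA_stop ws s _ _ _ hlt]
    simp
  · have hs : 0 < s := hpre.resolve_right hlt
    rw [if_neg hlt]
    have hb : pvLoopA ws s (el - ws + 1).toNat el [] = pvBack ws s el := by
      have h := pvLoopA_eq ws s hs (el - ws + 1).toNat el []
        (by rw [Int.toNat_of_nonneg (by omega)]; omega)
      simpa using h
    rw [hb, pvAlt_list el ws s hs hlt]
    rcases hE : (pvBack ws s el).reverse with _ | ⟨⟨st, en⟩, tl⟩ <;> simp
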